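-- pv_equiv track=rewrite | github.com/SunwoongH/algorithm | Programmers/PCCP/퍼즐 게임 챌린지.py | solution
-- ===== SOURCE A (Python) =====
-- def solution(diffs, times, limit):
--     low, high = 1, 100000
--     answer = None
--
--     while low <= high:
--         total = 0
--         level = (low + high) // 2
--         for i in range(len(times)):
--             if diffs[i] <= level:
--                 total += times[i]
--             else:
--                 count = diffs[i] - level
--                 if i == 0:
--                     total += count * times[i] + times[i]
--                 else:
--                     total += count * (times[i] + times[i - 1]) + times[i]
--         if total > limit:
--             low = level + 1
--         else:
--             answer = level
--             high = level - 1
--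
--     return answer
-- ===== SOURCE B (Python) =====
-- def _bisect_right(ds, x):
--     lo, hi = 0, len(ds)
--     while lo < hi:
--         mid = (lo + hi) // 2
--         if ds[mid] <= x:
--             lo = mid + 1
--         else:
--             hi = mid
--     return lo
--
--
-- def solution(diffs, times, limit):
--     # weight of level i: times[i] + times[i-1] (times[-1] treated as 0)
--     ws = [t + p for t, p in zip(times, [0] + times)]
--     pairs = sorted(((diffs[i], ws[i]) for i in range(len(times))), key=lambda p: p[0])
--     sds = [p[0] for p in pairs]
--     base = sum(times)
--     # suffix sums over the sorted pairs: suf_w[k] = sum of w, suf_dw[k] = sum of d*w, over pairs[k:]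
--     suf_w = [0]
--     for p in reversed(pairs):
--         suf_w.append(suf_w[-1] + p[1])
--     suf_w.reverse()
--     suf_dw = [0]
--     for p in reversed(pairs):
--         suf_dw.append(suf_dw[-1] + p[0] * p[1])
--     suf_dw.reverse()
--     low, high = 1, 100000
--     answer = None
--     while low <= high:
--         level = (low + high) // 2
--         k = _bisect_right(sds, level)
--         total = base + suf_dw[k] - level * suf_w[k]
--         if total > limit:
--             low = level + 1
--         else:
--             answer = level
--             high = level - 1
--     return answer
-- ===== Notes on version B (the rewrite author's own statement) =====
-- stated objective: faster
-- what changed: A rescans all n levels to recompute the total time at every binary-search probe; B sorts the levels by difficulty once and precomputes suffix sums of w and d*w, so each probe is a bisect plus O(1) arithmetic.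
import Mathlib
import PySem

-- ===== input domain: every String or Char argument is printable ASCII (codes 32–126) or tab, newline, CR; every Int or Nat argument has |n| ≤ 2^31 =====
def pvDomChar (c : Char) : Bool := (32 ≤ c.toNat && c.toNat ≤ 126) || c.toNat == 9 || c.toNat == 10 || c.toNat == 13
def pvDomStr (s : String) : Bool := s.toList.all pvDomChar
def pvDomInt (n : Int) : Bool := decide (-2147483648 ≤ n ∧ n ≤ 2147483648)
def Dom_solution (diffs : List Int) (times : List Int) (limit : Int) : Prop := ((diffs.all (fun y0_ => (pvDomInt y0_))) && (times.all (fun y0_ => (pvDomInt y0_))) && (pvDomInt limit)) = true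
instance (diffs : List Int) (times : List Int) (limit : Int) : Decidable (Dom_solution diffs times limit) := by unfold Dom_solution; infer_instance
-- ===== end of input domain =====

-- B replaces A's O(n) rescan of every level per binary-search probe by sorting the levels by
-- difficulty once, with suffix sums, so each probe costs O(log n): asymptotically faster.

-- ===== PORT A =====
-- the inner 'for i in range(len(times))' accumulation of A; Pre_solution guarantees every
-- index is in range, so pyGetD with default 0 reads exactly the elements A reads
def totalA (diffs times : List Int) (level : Int) : Int :=
  List.foldl (fun total i =>
    if PySem.List.pyGetD diffs i 0 ≤ level then total + PySem.List.pyGetD times i 0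
    else
      let count := PySem.List.pyGetD diffs i 0 - level
      if i = 0 then total + (count * PySem.List.pyGetD times i 0 + PySem.List.pyGetD times i 0)
      else total + (count * (PySem.List.pyGetD times i 0 + PySem.List.pyGetD times (i - 1) 0)
                    + PySem.List.pyGetD times i 0))
    0 (PySem.List.pyRange 0 (PySem.List.len times))

-- the 'while low <= high' binary search of A; the fuel 100001 bounds the iteration count
-- (high - low + 1 shrinks every pass from its initial 100000), so the loop always ends
-- by its own exit test exactly as in Python
def loopA (diffs times : List Int) (limit : Int) :
    Nat → Int → Int → Option Int → Option Int
  | 0, _, _, answer => answer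
  | fuel + 1, low, high, answer =>
    if low ≤ high then
      let level := PySem.Int.floordiv (low + high) 2
      if totalA diffs times level > limit then
        loopA diffs times limit fuel (level + 1) high answer
      else
        loopA diffs times limit fuel low (level - 1) (some level)
    else answer

def solution (diffs : List Int) (times : List Int) (limit : Int) : Option Int :=
  loopA diffs times limit 100001 1 100000 none

-- ===== PORT B =====
-- B's hand-written bisect_right loop ('while lo < hi: …'); fuel len+1 bounds the
-- iteration count (hi - lo shrinks every pass), so the loop ends by its own test
def bisR (ds : List Int) (x : Int) : Nat → Nat → Nat → Nat
  | 0, lo, _ => lo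
  | fuel + 1, lo, hi =>
    if lo < hi then
      let mid := (lo + hi) / 2
      if PySem.List.pyGetD ds (mid : Int) 0 ≤ x then bisR ds x fuel (mid + 1) hi
      else bisR ds x fuel lo mid
    else lo

-- B's suffix-sum builder: Python appends out[-1] + f(p) while walking pairs reversed, then
-- reverses; here the accumulator is kept already reversed (cons = append-at-end, headD = out[-1])
def sufsB (ps : List (Int × Int)) (f : Int × Int → Int) : List Int :=
  List.foldl (fun out p => (out.headD 0 + f p) :: out) [0] ps.reverse

-- one probe of B: total = base + suf_dw[k] - level * suf_w[k]
def evalB (base : Int) (sds sufW sufDW : List Int) (level : Int) : Int :=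
  let k := bisR sds level (sds.length + 1) 0 sds.length
  base + PySem.List.pyGetD sufDW (k : Int) 0 - level * PySem.List.pyGetD sufW (k : Int) 0

-- B's 'while low <= high' binary search, with the same fuel bound as A's
def loopB (limit base : Int) (sds sufW sufDW : List Int) :
    Nat → Int → Int → Option Int → Option Int
  | 0, _, _, answer => answer
  | fuel + 1, low, high, answer =>
    if low ≤ high then
      let level := PySem.Int.floordiv (low + high) 2
      if evalB base sds sufW sufDW level > limit then
        loopB limit base sds sufW sufDW fuel (level + 1) high answer
      else
        loopB limit base sds sufW sufDW fuel low (level - 1) (some level)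
    else answer

-- B's '(diffs[i], ws[i]) for i in range(len(times))'; Pre_solution guarantees every index is
-- in range, so pyGetD with default 0 reads exactly the elements B reads
def solution_alt (diffs : List Int) (times : List Int) (limit : Int) : Option Int :=
  let ws := (List.zip times (0 :: times)).map (fun p => p.1 + p.2)
  let pairs := PySem.List.sorted
      ((PySem.List.pyRange 0 (PySem.List.len times)).map
        (fun i => (PySem.List.pyGetD diffs i 0, PySem.List.pyGetD ws i 0)))
      (fun p => p.1) false
  let sds := pairs.map (fun p => p.1)
  let base := times.sum
  let sufW := sufsB pairs (fun p => p.2)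
  let sufDW := sufsB pairs (fun p => p.1 * p.2)
  loopB limit base sds sufW sufDW 100001 1 100000 none

-- ===== PRECONDITION & SPEC =====
-- Pre_ excludes exactly the inputs with fewer diffs than times, on which A raises IndexError
-- (B raises there too)
def Pre_solution (diffs : List Int) (times : List Int) (limit : Int) : Prop :=
  times.length ≤ diffs.length
instance (diffs : List Int) (times : List Int) (limit : Int) :
    Decidable (Pre_solution diffs times limit) := by unfold Pre_solution; infer_instance

def pvWitness_solution : List Int × List Int × Int := ([2, 5], [3, 4], 20)

def Spec_solution (diffs : List Int) (times : List Int) (limit : Int) (out : Option Int) : Prop :=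
  out = solution_alt diffs times limit
instance (diffs : List Int) (times : List Int) (limit : Int) (out : Option Int) :
    Decidable (Spec_solution diffs times limit out) := by unfold Spec_solution; infer_instance

-- ===== CLAIM (what is proved, stated in full; the proofs are below) =====
def Claim_equal_solution : Prop := ∀ (diffs : List Int) (times : List Int) (limit : Int), Dom_solution diffs times limit → Pre_solution diffs times limit → Spec_solution diffs times limit (solution diffs times limit)

-- ===== LEMMAS AND PROOFS =====

theorem getD_zero_headD (l : List Int) : l.getD 0 0 = l.headD 0 := by
  cases l <;> rfl

-- pyRange 0 n enumerates the Nat-indices 0..n-1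
theorem pyRange_zero_natCast (n : Nat) :
    PySem.List.pyRange 0 (n : Int) = List.map Nat.cast (List.range n) := by
  induction n with
  | zero => simp [PySem.List.pyRange]
  | succ n ih =>
    have h1 : PySem.List.pyRange 0 (((n : Nat) + 1 : Nat) : Int)
        = PySem.List.pyRange 0 (n : Int) ++ PySem.List.pyRange (n : Int) ((n : Int) + 1) := by
      push_cast
      exact PySem.List.pyRange_one_append 0 (n : Int) ((n : Int) + 1) (by positivity) (by omega)
    have h2 : PySem.List.pyRange (n : Int) ((n : Int) + 1) = [(n : Int)] := by
      rw [PySem.List.pyRange_one_cons (by omega)]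
      simp [PySem.List.pyRange]
    rw [h1, h2, ih, List.range_succ]
    simp

-- summing f over the positions of a list is summing f over the list
theorem sum_range_getD {α : Type} (l : List α) (d : α) (f : α → Int) :
    ((List.range l.length).map (fun i => f (l.getD i d))).sum = (l.map f).sum := by
  induction l with
  | nil => simp
  | cons x xs ih =>
    simp only [List.length_cons, List.range_succ_eq_map, List.map_cons, List.map_map,
      Function.comp_def, List.getD_cons_zero, List.getD_cons_succ, List.sum_cons]
    rw [ih]

-- a sum of if-then-else-0 is a sum over the filter
theorem sum_map_ite_filter (l : List (Int × Int)) (level : Int) (f : Int × Int → Int) :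
    (l.map (fun p => if level < p.1 then f p else 0)).sum
      = ((l.filter (fun p => decide (level < p.1))).map f).sum := by
  induction l with
  | nil => simp
  | cons p t ih =>
    by_cases h : level < p.1 <;> simp [List.filter_cons, h, ih]

-- splitting the sum of (d - level) * w
theorem sum_map_sub_mul (l : List (Int × Int)) (level : Int) :
    (l.map (fun p => (p.1 - level) * p.2)).sum
      = (l.map (fun p => p.1 * p.2)).sum - level * (l.map (fun p => p.2)).sum := by
  induction l with
  | nil => simp
  | cons p t ih =>
    simp only [List.map_cons, List.sum_cons, ih]
    ring

-- a filter whose truth values are false before k and true from k on is drop k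
theorem filter_eq_drop {α : Type} (p : α → Bool) :
    ∀ (l : List α) (k : Nat), k ≤ l.length →
    (∀ j (hj : j < l.length), j < k → p l[j] = false) →
    (∀ j (hj : j < l.length), k ≤ j → p l[j] = true) →
    l.filter p = l.drop k := by
  intro l
  induction l with
  | nil => intro k _ _ _; simp
  | cons x xs ih =>
    intro k hk h1 h2
    cases k with
    | zero =>
      rw [List.drop_zero]
      apply List.filter_eq_self.mpr
      intro a ha
      obtain ⟨j, hj, rfl⟩ := List.mem_iff_getElem.mp ha
      exact h2 j hj (Nat.zero_le j)
    | succ k =>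
      have hx : p x = false := h1 0 (by simp) (Nat.succ_pos k)
      rw [List.drop_succ_cons, List.filter_cons_of_neg (by simp [hx])]
      exact ih k (by simpa using hk)
        (fun j hj hjk => by simpa using h1 (j + 1) (by simpa using Nat.succ_lt_succ hj) (by omega))
        (fun j hj hjk => by simpa using h2 (j + 1) (by simpa using Nat.succ_lt_succ hj) (by omega))

theorem sufsB_cons (q : Int × Int) (ps : List (Int × Int)) (f : Int × Int → Int) :
    sufsB (q :: ps) f = ((sufsB ps f).headD 0 + f q) :: sufsB ps f := by
  simp [sufsB, List.foldl_append]

theorem sufsB_getD (f : Int × Int → Int) :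
    ∀ (ps : List (Int × Int)) (k : Nat), k ≤ ps.length →
    (sufsB ps f).getD k 0 = ((ps.drop k).map f).sum := by
  intro ps
  induction ps with
  | nil =>
    intro k hk
    have : k = 0 := Nat.le_zero.mp hk
    subst this
    simp [sufsB]
  | cons q t ih =>
    intro k hk
    rw [sufsB_cons]
    cases k with
    | zero =>
      have h0 : (sufsB t f).headD 0 = (t.map f).sum := by
        rw [← getD_zero_headD]; simpa using ih 0 (Nat.zero_le _)
      simp only [List.getD_cons_zero, List.drop_zero, List.map_cons, List.sum_cons, h0]
      ring
    | succ k =>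
      simp only [List.getD_cons_succ, List.drop_succ_cons]
      exact ih k (by simpa using hk)

-- the invariant of B's hand-written bisect loop
theorem bisR_spec (ds : List Int) (x : Int) (hs : List.Pairwise (· ≤ ·) ds) :
    ∀ (lo hi : Nat), hi ≤ ds.length → lo ≤ hi →
    (∀ j (hj : j < ds.length), j < lo → ds[j] ≤ x) →
    (∀ j (hj : j < ds.length), hi ≤ j → x < ds[j]) →
    ∀ (fuel : Nat), hi - lo ≤ fuel →
    bisR ds x fuel lo hi ≤ ds.length ∧
    (∀ j (hj : j < ds.length), j < bisR ds x fuel lo hi → ds[j] ≤ x) ∧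
    (∀ j (hj : j < ds.length), bisR ds x fuel lo hi ≤ j → x < ds[j]) := by
  suffices h : ∀ (fuel lo hi : Nat), hi - lo ≤ fuel → hi ≤ ds.length → lo ≤ hi →
      (∀ j (hj : j < ds.length), j < lo → ds[j] ≤ x) →
      (∀ j (hj : j < ds.length), hi ≤ j → x < ds[j]) →
      bisR ds x fuel lo hi ≤ ds.length ∧
      (∀ j (hj : j < ds.length), j < bisR ds x fuel lo hi → ds[j] ≤ x) ∧
      (∀ j (hj : j < ds.length), bisR ds x fuel lo hi ≤ j → x < ds[j]) by
    intro lo hi hlen hlohi h3 h4 fuel hm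
    exact h fuel lo hi hm hlen hlohi h3 h4
  intro fuel
  induction fuel with
  | zero =>
    intro lo hi hm hlen hlohi h3 h4
    rw [bisR]
    exact ⟨by omega, h3, fun j hj hjge => h4 j hj (by omega)⟩
  | succ m ihm =>
    intro lo hi hm hlen hlohi h3 h4
    by_cases hlt : lo < hi
    · rw [bisR, if_pos hlt]
      have hmb : lo ≤ (lo + hi) / 2 ∧ (lo + hi) / 2 < hi := by omega
      have hmlen : (lo + hi) / 2 < ds.length := by omega
      have hget : PySem.List.pyGetD ds (((lo + hi) / 2 : Nat) : Int) 0 = ds[(lo + hi) / 2] := by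
        rw [PySem.List.pyGetD_natCast, List.getD_eq_getElem _ _ hmlen]
      by_cases hc : PySem.List.pyGetD ds (((lo + hi) / 2 : Nat) : Int) 0 ≤ x
      · simp only [if_pos hc]
        apply ihm ((lo + hi) / 2 + 1) hi (by omega) hlen (by omega) ?_ h4
        intro j hj hjlt
        have hjm : j ≤ (lo + hi) / 2 := by omega
        have hdm : ds[j] ≤ ds[(lo + hi) / 2] := by
          rcases Nat.lt_or_ge j ((lo + hi) / 2) with h | h
          · exact List.pairwise_iff_getElem.mp hs j _ hj hmlen h
          · have : j = (lo + hi) / 2 := by omega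
            subst this; exact le_rfl
        rw [hget] at hc
        exact le_trans hdm hc
      · simp only [if_neg hc]
        apply ihm lo ((lo + hi) / 2) (by omega) (by omega) (by omega) h3 ?_
        intro j hj hjge
        have hxm : x < ds[(lo + hi) / 2] := by rw [hget] at hc; omega
        rcases Nat.eq_or_lt_of_le hjge with h | h
        · exact h ▸ hxm
        · exact lt_of_lt_of_le hxm (List.pairwise_iff_getElem.mp hs _ j hmlen hj h)
    · rw [bisR, if_neg hlt]
      exact ⟨by omega, h3, fun j hj hjge => h4 j hj (by omega)⟩

-- ws[k] = times[k] + times[k-1] (0 at k = 0)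
theorem ws_getD (times : List Int) (k : Nat) (hk : k < times.length) :
    ((List.zip times (0 :: times)).map (fun p => p.1 + p.2)).getD k 0
      = times.getD k 0 + (if k = 0 then 0 else times.getD (k - 1) 0) := by
  have hl : ((List.zip times (0 :: times)).map (fun p => p.1 + p.2)).length = times.length := by
    simp [List.length_zip]
  rw [List.getD_eq_getElem _ _ (by omega : k < ((List.zip times (0 :: times)).map
      (fun p => p.1 + p.2)).length)]
  simp only [List.getElem_map, List.getElem_zip]
  cases k with
  | zero =>
    simp [List.getD, List.getElem?_eq_getElem hk]
  | succ j =>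
    have hj : j < times.length := by omega
    simp [List.getD, List.getElem?_eq_getElem hk, List.getElem?_eq_getElem hj]

theorem zs_getD (diffs ws : List Int) (k : Nat) (hk : k < (List.zip diffs ws).length) :
    (List.zip diffs ws).getD k (0, 0) = (diffs.getD k 0, ws.getD k 0) := by
  have h1 : k < diffs.length := by simp [List.length_zip] at hk; omega
  have h2 : k < ws.length := by simp [List.length_zip] at hk; omega
  rw [List.getD_eq_getElem _ _ hk, List.getD_eq_getElem _ _ h1, List.getD_eq_getElem _ _ h2,
    List.getElem_zip]

-- under Pre_, B's indexed pair list is exactly the zip of diffs and ws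
theorem range_pairs_eq_zip (diffs ws : List Int) (n : Nat) (hn : n = ws.length)
    (h : n ≤ diffs.length) :
    (List.range n).map
        (fun i => (PySem.List.pyGetD diffs ((i : Nat) : Int) 0,
                   PySem.List.pyGetD ws ((i : Nat) : Int) 0))
      = List.zip diffs ws := by
  apply List.ext_getElem
  · simp [List.length_zip]; omega
  · intro i h1 h2
    have hi : i < n := by simpa using h1
    have hid : i < diffs.length := by omega
    have hiw : i < ws.length := by omega
    simp only [List.getElem_map, List.getElem_range, List.getElem_zip,
      PySem.List.pyGetD_natCast, List.getD_eq_getElem _ _ hid, List.getD_eq_getElem _ _ hiw]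

-- characterisation of A's probe: base + Σ_{d>level} (d-level)·w over zip diffs ws
theorem totalA_char (diffs times : List Int) (level : Int)
    (hpre : times.length ≤ diffs.length) :
    totalA diffs times level
      = times.sum + ((List.zip diffs ((List.zip times (0 :: times)).map (fun p => p.1 + p.2))).map
          (fun p => if level < p.1 then (p.1 - level) * p.2 else 0)).sum := by
  have hwsl : ((List.zip times (0 :: times)).map (fun p => p.1 + p.2)).length = times.length := by
    simp [List.length_zip]
  have hzl : (List.zip diffs ((List.zip times (0 :: times)).map (fun p => p.1 + p.2))).length
      = times.length := by
    simp [List.length_zip]; omega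
  unfold totalA
  have hlen : PySem.List.len times = ((times.length : Nat) : Int) := by simp [PySem.List.len]
  rw [hlen, pyRange_zero_natCast, List.foldl_map]
  rw [PySem.List.foldl_congr_mem _ _
    (fun total k => total + (times.getD k 0 +
      (if level < diffs.getD k 0 then (diffs.getD k 0 - level) *
        ((List.zip times (0 :: times)).map (fun p => p.1 + p.2)).getD k 0 else 0))) 0 ?hcong]
  case hcong =>
    intro acc k hk
    rw [List.mem_range] at hk
    simp only [PySem.List.pyGetD_natCast]
    by_cases hd : diffs.getD k 0 ≤ level
    · rw [if_pos hd, if_neg (not_lt.mpr hd)]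
      ring
    · have hlv : level < diffs.getD k 0 := lt_of_not_ge hd
      simp only [if_neg hd, if_pos hlv]
      cases k with
      | zero =>
        have hw := ws_getD times 0 hk
        rw [if_pos rfl] at hw
        simp only [Nat.cast_zero]
        rw [if_pos (by trivial), hw]
        ring
      | succ j =>
        have hw := ws_getD times (j + 1) hk
        simp only [Nat.add_sub_cancel, if_neg (Nat.succ_ne_zero j)] at hw
        have hcast : ((j + 1 : Nat) : Int) - 1 = ((j : Nat) : Int) := by push_cast; ring
        have hne : ¬ ((j + 1 : Nat) : Int) = 0 := by push_cast; omega
        simp only [if_neg hne, hcast, PySem.List.pyGetD_natCast, hw]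
        ring
  rw [PySem.List.foldl_add]
  rw [PySem.List.sum_map_add_int]
  have e1 : ((List.range times.length).map (fun k => times.getD k 0)).sum = times.sum := by
    simpa using sum_range_getD times 0 (fun x => x)
  have e2 : ((List.range times.length).map
      (fun k => if level < diffs.getD k 0 then (diffs.getD k 0 - level) *
        ((List.zip times (0 :: times)).map (fun p => p.1 + p.2)).getD k 0 else 0)).sum
      = ((List.zip diffs ((List.zip times (0 :: times)).map (fun p => p.1 + p.2))).map
          (fun p => if level < p.1 then (p.1 - level) * p.2 else 0)).sum := by
    rw [← hzl, ← sum_range_getD (List.zip diffs ((List.zip times (0 :: times)).map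
      (fun p => p.1 + p.2))) (0, 0) (fun p => if level < p.1 then (p.1 - level) * p.2 else 0)]
    congr 1
    apply List.map_congr_left
    intro k hk
    rw [List.mem_range] at hk
    rw [zs_getD _ _ k (by omega)]
  rw [e1, e2]
  ring

-- characterisation of B's probe: the same quantity
theorem evalB_char (diffs times : List Int) (level : Int)
    (hpre : times.length ≤ diffs.length) :
    evalB times.sum
      ((PySem.List.sorted (List.zip diffs ((List.zip times (0 :: times)).map
        (fun p => p.1 + p.2))) (fun p => p.1) false).map (fun p => p.1))
      (sufsB (PySem.List.sorted (List.zip diffs ((List.zip times (0 :: times)).map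
        (fun p => p.1 + p.2))) (fun p => p.1) false) (fun p => p.2))
      (sufsB (PySem.List.sorted (List.zip diffs ((List.zip times (0 :: times)).map
        (fun p => p.1 + p.2))) (fun p => p.1) false) (fun p => p.1 * p.2))
      level
      = times.sum + ((List.zip diffs ((List.zip times (0 :: times)).map (fun p => p.1 + p.2))).map
          (fun p => if level < p.1 then (p.1 - level) * p.2 else 0)).sum := by
  set zs := List.zip diffs ((List.zip times (0 :: times)).map (fun p => p.1 + p.2)) with hzsdef
  set pairs := PySem.List.sorted zs (fun p => p.1) false with hpairsdef
  have hperm : pairs.Perm zs := PySem.List.sorted_perm zs (fun p => p.1) false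
  have hsds : List.Pairwise (· ≤ ·) (pairs.map (fun p => p.1)) :=
    PySem.List.sorted_map_key_pairwise zs (fun p => p.1)
  have hlsds : (pairs.map (fun p => p.1)).length = pairs.length := by simp
  obtain ⟨hk1, hk2, hk3⟩ := bisR_spec (pairs.map (fun p => p.1)) level hsds 0
    (pairs.map (fun p => p.1)).length le_rfl (Nat.zero_le _)
    (fun j hj hj0 => absurd hj0 (Nat.not_lt_zero j))
    (fun j hj hge => absurd hj (by omega))
    ((pairs.map (fun p => p.1)).length + 1) (by omega)
  set k := bisR (pairs.map (fun p => p.1)) level ((pairs.map (fun p => p.1)).length + 1) 0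
    (pairs.map (fun p => p.1)).length with hkdef
  have hkp : k ≤ pairs.length := by omega
  show times.sum + PySem.List.pyGetD (sufsB pairs (fun p => p.1 * p.2)) ((k : Nat) : Int) 0
      - level * PySem.List.pyGetD (sufsB pairs (fun p => p.2)) ((k : Nat) : Int) 0 = _
  rw [PySem.List.pyGetD_natCast, PySem.List.pyGetD_natCast,
    sufsB_getD _ pairs k hkp, sufsB_getD _ pairs k hkp]
  have hdrop : pairs.filter (fun p => decide (level < p.1)) = pairs.drop k := by
    apply filter_eq_drop _ pairs k hkp
    · intro j hj hjk
      have hj' : j < (pairs.map (fun p => p.1)).length := by omega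
      have hle := hk2 j hj' hjk
      simp only [List.getElem_map] at hle
      simp only [decide_eq_false_iff_not, not_lt]
      exact hle
    · intro j hj hjk
      have hj' : j < (pairs.map (fun p => p.1)).length := by omega
      have hlt := hk3 j hj' hjk
      simp only [List.getElem_map] at hlt
      simp only [decide_eq_true_eq]
      exact hlt
  rw [sum_map_ite_filter]
  have h1 : ((zs.filter (fun p => decide (level < p.1))).map
      (fun p => (p.1 - level) * p.2)).sum
      = ((pairs.drop k).map (fun p => (p.1 - level) * p.2)).sum := by
    rw [← hdrop]
    exact (((hperm.filter _).symm).map _).sum_eq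
  rw [h1, sum_map_sub_mul]
  ring

-- the two binary searches step in lockstep once the probes agree
theorem loop_eq (diffs times : List Int) (limit base : Int) (sds sufW sufDW : List Int)
    (hT : ∀ level, totalA diffs times level = evalB base sds sufW sufDW level) :
    ∀ (fuel : Nat) (low high : Int) (answer : Option Int),
      loopA diffs times limit fuel low high answer
        = loopB limit base sds sufW sufDW fuel low high answer := by
  intro fuel
  induction fuel with
  | zero => intro low high answer; rw [loopA, loopB]
  | succ m ihm =>
    intro low high answer
    by_cases hlh : low ≤ high
    · rw [loopA, loopB, if_pos hlh, if_pos hlh]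
      simp only [hT]
      by_cases hc : evalB base sds sufW sufDW (PySem.Int.floordiv (low + high) 2) > limit
      · rw [if_pos hc, if_pos hc]
        exact ihm _ _ _
      · rw [if_neg hc, if_neg hc]
        exact ihm _ _ _
    · rw [loopA, loopB, if_neg hlh, if_neg hlh]

-- ===== VERDICT (by name: the statement is the Claim_ definition above) =====
theorem solution_spec : Claim_equal_solution := by
  intro diffs times limit _dom hpre
  unfold Spec_solution solution solution_alt
  simp only []
  rw [show PySem.List.len times = ((times.length : Nat) : Int) from by simp [PySem.List.len],
    pyRange_zero_natCast, List.map_map]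
  simp only [Function.comp_def]
  rw [range_pairs_eq_zip diffs ((List.zip times (0 :: times)).map (fun p => p.1 + p.2))
    times.length (by simp [List.length_zip]) hpre]
  exact loop_eq diffs times limit _ _ _ _
    (fun level => (totalA_char diffs times level hpre).trans
      (evalB_char diffs times level hpre).symm) 100001 1 100000 none
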